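-- pv_equiv track=rewrite | github.com/corrumptus/tarefas-python | projeto dataset/Lucas-smartphone.py | get_all_configurations_by_company
-- ===== SOURCE A (Python) =====
-- def get_all_configurations_by_company(devices: list[dict[str, str]]) -> dict[str, list[str]]:
--     configurations: dict[str, list[str]] = {}
--
--     for device in devices:
--         company: str = device["company"]
--         configuration: str = device["coreConfig"]
--
--         if company not in configurations:
--             configurations[company] = []
--
--         configurations[company].append(configuration)
--
--     return configurations
-- ===== SOURCE B (Python) =====
-- def get_all_configurations_by_company(devices: list[dict[str, str]]) -> dict[str, list[str]]:
--     companies = list(dict.fromkeys(d["company"] for d in devices))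
--     return {c: [d["coreConfig"] for d in devices if d["company"] == c]
--             for c in companies}
-- ===== Notes on version B (the rewrite author's own statement) =====
-- stated objective: alternative
-- what changed: Replaces the single-pass dict-accumulation loop by a two-phase decomposition: dedup the company keys in first-encounter order, then build each group with a filter comprehension over the whole list.
import Mathlib
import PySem

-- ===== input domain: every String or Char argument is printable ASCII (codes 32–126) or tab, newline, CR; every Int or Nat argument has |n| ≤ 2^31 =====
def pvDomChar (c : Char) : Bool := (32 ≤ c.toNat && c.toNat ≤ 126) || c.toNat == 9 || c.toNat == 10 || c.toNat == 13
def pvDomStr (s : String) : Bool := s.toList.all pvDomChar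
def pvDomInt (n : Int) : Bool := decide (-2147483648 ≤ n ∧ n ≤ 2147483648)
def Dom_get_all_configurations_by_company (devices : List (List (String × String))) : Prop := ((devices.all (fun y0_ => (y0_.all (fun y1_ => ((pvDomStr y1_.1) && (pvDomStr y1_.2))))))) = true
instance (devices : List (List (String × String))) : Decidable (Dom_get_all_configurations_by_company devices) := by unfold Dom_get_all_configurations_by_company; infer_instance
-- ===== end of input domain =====

-- B groups by a dedup-keys pass plus per-company filter comprehensions instead of A's
-- single accumulating-dict loop; equivalence is about the returned association list.

-- device["k"]: first-match lookup in the device dict (Pre_ guarantees the key is present)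
def pvLookup (device : List (String × String)) (k : String) : String :=
  ((PySem.Dict.mk device).get? k).getD ""

-- ===== PORT A =====
def gacStep (configurations : PySem.Dict String (List String))
    (device : List (String × String)) : PySem.Dict String (List String) :=
  let company := pvLookup device "company"
  let configuration := pvLookup device "coreConfig"
  let configurations :=
    if configurations.contains company then configurations
    else configurations.insert company []
  configurations.modify company [] (fun l => l ++ [configuration])

def get_all_configurations_by_company (devices : List (List (String × String))) : List (String × List String) :=
  (devices.foldl gacStep PySem.Dict.empty).items

-- ===== PORT B =====
def get_all_configurations_by_company_alt (devices : List (List (String × String))) : List (String × List String) :=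
  let companies := PySem.List.dedup (devices.map (fun d => pvLookup d "company"))
  companies.map (fun c =>
    (c, (devices.filter (fun d => pvLookup d "company" == c)).map
          (fun d => pvLookup d "coreConfig")))

-- ===== PRECONDITION & SPEC =====
-- A raises KeyError on a device missing the "company" or "coreConfig" key; exactly those inputs are excluded.
def Pre_get_all_configurations_by_company (devices : List (List (String × String))) : Prop :=
  (devices.all (fun d => d.any (fun p => p.1 == "company") && d.any (fun p => p.1 == "coreConfig"))) = true
instance (devices : List (List (String × String))) : Decidable (Pre_get_all_configurations_by_company devices) := by unfold Pre_get_all_configurations_by_company; infer_instance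

def pvWitness_get_all_configurations_by_company : (List (List (String × String))) :=
  [[("company", "acme"), ("coreConfig", "octa")], [("company", "acme"), ("coreConfig", "quad")]]

def Spec_get_all_configurations_by_company (devices : List (List (String × String))) (out : List (String × List String)) : Prop := out = get_all_configurations_by_company_alt devices
instance (devices : List (List (String × String))) (out : List (String × List String)) : Decidable (Spec_get_all_configurations_by_company devices out) := by unfold Spec_get_all_configurations_by_company; infer_instance

-- ===== CLAIM (what is proved, stated in full; the proofs are below) =====
def Claim_equal_get_all_configurations_by_company : Prop := ∀ (devices : List (List (String × String))), Dom_get_all_configurations_by_company devices → Pre_get_all_configurations_by_company devices → Spec_get_all_configurations_by_company devices (get_all_configurations_by_company devices)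

-- ===== LEMMAS AND PROOFS =====

-- A's guarded insert-then-append step is exactly a modify with default []
theorem gacStep_eq_modify (cfg : PySem.Dict String (List String)) (device : List (String × String)) :
    gacStep cfg device
      = cfg.modify (pvLookup device "company") [] (fun l => l ++ [pvLookup device "coreConfig"]) := by
  unfold gacStep
  by_cases h : cfg.contains (pvLookup device "company") = true
  · simp [h]
  · simp only [Bool.not_eq_true] at h
    simp [h, PySem.Dict.modify, PySem.Dict.getD_of_not_contains _ _ h,
      PySem.Dict.getD_insert_self, PySem.Dict.insert_insert_self]

theorem get_all_configurations_by_company_spec : Claim_equal_get_all_configurations_by_company := by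
  intro devices _ _
  show get_all_configurations_by_company devices = get_all_configurations_by_company_alt devices
  unfold get_all_configurations_by_company get_all_configurations_by_company_alt
  have hstep : devices.foldl gacStep PySem.Dict.empty
      = (devices.map (fun d => (pvLookup d "company", pvLookup d "coreConfig"))).foldl
          (fun cfg p => cfg.modify p.1 [] (fun l => l ++ [p.2])) PySem.Dict.empty := by
    rw [List.foldl_map]
    exact PySem.List.foldl_congr_mem _ _ _ _ (fun cfg d _ => gacStep_eq_modify cfg d)
  have hnodup : (devices.foldl gacStep PySem.Dict.empty).keys.Nodup := by
    rw [hstep]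
    exact PySem.Dict.nodup_keys_foldl_modify_key _ _ _ _ _ (by simp [PySem.Dict.keys_empty])
  rw [PySem.Dict.items_eq_map_keys _ hnodup []]
  have hkeys : (devices.foldl gacStep PySem.Dict.empty).keys
      = PySem.List.dedup (devices.map (fun d => pvLookup d "company")) := by
    rw [hstep]
    have := PySem.Dict.keys_foldl_modify_key
      (l := devices.map (fun d => (pvLookup d "company", pvLookup d "coreConfig")))
      (key := Prod.fst) (d0 := ([] : List String))
      (f := fun (cfg : PySem.Dict String (List String)) p (l : List String) => l ++ [p.2])
      (d := PySem.Dict.empty)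
    simp only [List.map_map] at this ⊢
    rw [this]
    simp [PySem.Dict.keys_empty, PySem.Set.update, PySem.List.dedup_eq_ofList,
      PySem.Set.ofList_eq_foldl, Function.comp_def]
  rw [hkeys]
  apply List.map_congr_left
  intro c _
  congr 1
  rw [hstep, PySem.Dict.getD_foldl_modify_append]
  simp [List.filter_map, List.map_map, Function.comp_def]
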